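-- pv_equiv track=rewrite | github.com/panda2019-ai/natural_language_processing | MaxEntPosTag/maxent_postag/py/maxent_postag_iis.py | generate_events2
-- ===== SOURCE A (Python) =====
-- def generate_events2(text, train_flag=False):
--     # 定义事件序列，注意输入的1行文本可以抽取出多个事件
--     event_li = []
--     # 分词，要求输入的字符串中词语之间以空白分隔，对于训练集在词语后还要加词性标记：word/pos
--     word_li = text.split()
--     # 分离词语和词性
--     if train_flag:
--         # 对于含有词性标记的词语序列，分离词语和词性：[(word1,pos1),(word2,pos2),...]
--         word_li = [tuple(w.split(u'/')) for w in word_li if len(w.split(u'/')) == 2]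
--     else:
--         # 对于没有词性标记的词语序列，添加词性"x_pos"：[(word1,'x_pos'),(word2,'x_pos'),...]
--         word_li = [(w, u'x_pos') for w in word_li]
--     # 为词语序列添加头元素和尾元素，便于后续抽取事件
--     word_li = [(u'pre1', u'pre1_pos')] + word_li + [(u'pro1', u'pro1_pos')]
--     # 遍历中心词抽取1个event，每个event由1个词性标记和多个特征项构成
--     for i in range(1, len(word_li) - 1):
--         # 特征函数1 中心词
--         fea_1 = word_li[i][0]
--         # 特征函数2 前一个词
--         fea_2 = word_li[i - 1][0]
--         # 特征函数3 后一个词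
--         fea_3 = word_li[i + 1][0]
--         # 词性y
--         y = word_li[i][1]
--         # 构建1个事件，注意1个事件由3个特征项构成，同一事件中的3个特征项共享1个输出标记y
--         # 因此1个事件对应3个特征函数：f1(fea_1,y),f2(fea_2,y),f3(fea_3,y)
--         fields = [y, fea_1, fea_2, fea_3]
--         # 将事件添加到事件序列
--         event_li.append(fields)
--     # 返回事件序列
--     return event_li
-- ===== SOURCE B (Python) =====
-- def generate_events2(text, train_flag=False):
--     tokens = text.split()
--     if train_flag:
--         kept = [p for p in (w.split(u'/') for w in tokens) if len(p) == 2]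
--         words = [p[0] for p in kept]
--         tags = [p[1] for p in kept]
--     else:
--         words = tokens
--         tags = [u'x_pos'] * len(tokens)
--     prevs = [u'pre1'] + words[:-1]
--     nexts = words[1:] + [u'pro1']
--     return [[y, w, p, n] for y, w, p, n in zip(tags, words, prevs, nexts)]
-- ===== Notes on version B (the rewrite author's own statement) =====
-- stated objective: simpler
-- what changed: B drops A's sentinel-padding and index-window loop: it builds the word and tag lists once, forms the shifted neighbour lists ['pre1']+words[:-1] and words[1:]+['pro1'], and emits the events with a single zip over the four aligned lists.
import Mathlib
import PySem

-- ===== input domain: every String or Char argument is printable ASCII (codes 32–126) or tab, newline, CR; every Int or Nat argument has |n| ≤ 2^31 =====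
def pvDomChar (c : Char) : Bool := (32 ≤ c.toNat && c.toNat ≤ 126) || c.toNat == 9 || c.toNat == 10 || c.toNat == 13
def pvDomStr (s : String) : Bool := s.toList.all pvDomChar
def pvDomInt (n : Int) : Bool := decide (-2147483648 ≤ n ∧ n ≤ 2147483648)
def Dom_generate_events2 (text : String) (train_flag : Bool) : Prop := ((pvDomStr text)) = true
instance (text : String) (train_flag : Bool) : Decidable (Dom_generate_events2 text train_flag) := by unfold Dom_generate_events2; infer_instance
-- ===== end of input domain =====

-- B replaces A's sentinel-padded list and index-window loop by a zip of four shifted lists (objective: simpler).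

-- ===== PORT A =====
-- w.split(u'/'); exact: Str.split? is none only for an empty separator
def pvSplitSlash (w : String) : List String := (PySem.Str.split? w "/").getD []
-- tuple(parts) for a parts list; used only under the 'len == 2' filter, where it is (parts[0], parts[1])
def pvPair2 (p : List String) : String × String := (p.getD 0 "", p.getD 1 "")

def generate_events2 (text : String) (train_flag : Bool) : List (List String) :=
  let word_li0 := PySem.Str.split₀ text
  let word_li : List (String × String) :=
    if train_flag then
      (word_li0.filter (fun w => (pvSplitSlash w).length == 2)).map (fun w => pvPair2 (pvSplitSlash w))
    else
      word_li0.map (fun w => (w, "x_pos"))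
  let word_li := [("pre1", "pre1_pos")] ++ word_li ++ [("pro1", "pro1_pos")]
  (PySem.List.pyRange 1 ((word_li.length : Int) - 1) 1).foldl
    (fun event_li i =>
      let fea_1 := (PySem.List.pyGetD word_li i ("", "")).1
      let fea_2 := (PySem.List.pyGetD word_li (i - 1) ("", "")).1
      let fea_3 := (PySem.List.pyGetD word_li (i + 1) ("", "")).1
      let y := (PySem.List.pyGetD word_li i ("", "")).2
      event_li ++ [[y, fea_1, fea_2, fea_3]]) []

-- ===== PORT B =====
def generate_events2_alt (text : String) (train_flag : Bool) : List (List String) :=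
  let tokens := PySem.Str.split₀ text
  let wt : List String × List String :=
    if train_flag then
      let kept := (tokens.map pvSplitSlash).filter (fun p => p.length == 2)
      (kept.map (fun p => p.getD 0 ""), kept.map (fun p => p.getD 1 ""))
    else
      (tokens, List.replicate tokens.length "x_pos")
  let words := wt.1
  let tags := wt.2
  let prevs := ["pre1"] ++ PySem.List.slice words none (some (-1))
  let nexts := PySem.List.slice words (some 1) none ++ ["pro1"]
  (tags.zip (words.zip (prevs.zip nexts))).map (fun x => [x.1, x.2.1, x.2.2.1, x.2.2.2])

-- ===== PRECONDITION & SPEC =====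
def Spec_generate_events2 (text : String) (train_flag : Bool) (out : List (List String)) : Prop := out = generate_events2_alt text train_flag
instance (text : String) (train_flag : Bool) (out : List (List String)) : Decidable (Spec_generate_events2 text train_flag out) := by unfold Spec_generate_events2; infer_instance

-- ===== CLAIM (what is proved, stated in full; the proofs are below) =====
def Claim_equal_generate_events2 : Prop := ∀ (text : String) (train_flag : Bool), Dom_generate_events2 text train_flag → Spec_generate_events2 text train_flag (generate_events2 text train_flag)

-- ===== LEMMAS AND PROOFS =====

-- the word/pos pair list both programs effectively work over
def pvWordLi (text : String) (train_flag : Bool) : List (String × String) :=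
  if train_flag then
    ((PySem.Str.split₀ text).filter (fun w => (pvSplitSlash w).length == 2)).map (fun w => pvPair2 (pvSplitSlash w))
  else
    (PySem.Str.split₀ text).map (fun w => (w, "x_pos"))

-- the event A's loop emits for centre position k of L (0-based, unpadded)
def pvG (L : List (String × String)) (k : Nat) : List String :=
  [(L.getD k ("", "")).2, (L.getD k ("", "")).1,
   if k = 0 then "pre1" else (L.getD (k - 1) ("", "")).1,
   if k + 1 < L.length then (L.getD (k + 1) ("", "")).1 else "pro1"]

-- B's zip expression over the projections of L
def pvZipForm (L : List (String × String)) : List (List String) :=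
  ((L.map Prod.snd).zip ((L.map Prod.fst).zip
      (("pre1" :: (L.map Prod.fst).dropLast).zip ((L.map Prod.fst).tail ++ ["pro1"])))).map
    (fun x => [x.1, x.2.1, x.2.2.1, x.2.2.2])


-- the padded list A builds
def pvPad (L : List (String × String)) : List (String × String) :=
  [("pre1", "pre1_pos")] ++ L ++ [("pro1", "pro1_pos")]

lemma pvPad_len (L : List (String × String)) : (pvPad L).length = L.length + 2 := by
  simp [pvPad]

lemma pvPad_cons (L : List (String × String)) :
    pvPad L = ("pre1", "pre1_pos") :: (L ++ [("pro1", "pro1_pos")]) := by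
  simp [pvPad]

-- element access into the padded list, at the three window positions
lemma pvPad_mid (L : List (String × String)) (k : Nat) (hk : k < L.length) :
    (pvPad L).getD (k + 1) ("", "") = L[k] := by
  rw [pvPad_cons, List.getD_cons_succ,
      List.getD_eq_getElem _ _ (by simp; omega)]
  simp [hk]

lemma pvPad_left (L : List (String × String)) (k : Nat) (hk : k < L.length) :
    ((pvPad L).getD k ("", "")).1 = if k = 0 then "pre1" else (L.getD (k - 1) ("", "")).1 := by
  rw [pvPad_cons]
  cases k with
  | zero => simp
  | succ j =>
    have hj : j < L.length := by omega
    rw [if_neg (by omega), List.getD_cons_succ,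
        List.getD_eq_getElem _ _ (by simp; omega),
        List.getD_eq_getElem _ _ (by omega : j + 1 - 1 < L.length)]
    simp [hj]

lemma pvPad_right (L : List (String × String)) (k : Nat) (hk : k < L.length) :
    ((pvPad L).getD (k + 2) ("", "")).1 =
      if k + 1 < L.length then (L.getD (k + 1) ("", "")).1 else "pro1" := by
  rw [pvPad_cons, List.getD_cons_succ,
      List.getD_eq_getElem _ _ (by simp; omega)]
  by_cases h : k + 1 < L.length
  · rw [if_pos h, List.getD_eq_getElem _ _ h]
    simp [h]
  · rw [if_neg h]
    have he : k + 1 = L.length := by omega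
    simp [he]

lemma pv_loop (L : List (String × String)) :
    (PySem.List.pyRange 1 (((pvPad L).length : Int) - 1) 1).foldl
      (fun event_li i =>
        event_li ++ [[(PySem.List.pyGetD (pvPad L) i ("", "")).2,
                      (PySem.List.pyGetD (pvPad L) i ("", "")).1,
                      (PySem.List.pyGetD (pvPad L) (i - 1) ("", "")).1,
                      (PySem.List.pyGetD (pvPad L) (i + 1) ("", "")).1]]) []
    = (List.range L.length).map (pvG L) := by
  rw [PySem.List.foldl_append_singleton_eq_map
      (f := fun i => [(PySem.List.pyGetD (pvPad L) i ("", "")).2,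
                      (PySem.List.pyGetD (pvPad L) i ("", "")).1,
                      (PySem.List.pyGetD (pvPad L) (i - 1) ("", "")).1,
                      (PySem.List.pyGetD (pvPad L) (i + 1) ("", "")).1])]
  rw [PySem.List.pyRange_one, List.map_map, List.nil_append]
  have hb : (((pvPad L).length : Int) - 1 - 1).toNat = L.length := by
    simp only [pvPad_len]; omega
  rw [hb]
  apply List.map_congr_left
  intro k hk
  rw [List.mem_range] at hk
  have c1 : (1 : Int) + (k : Int) = ((k + 1 : Nat) : Int) := by push_cast; ring
  have c2 : ((k + 1 : Nat) : Int) - 1 = ((k : Nat) : Int) := by push_cast; ring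
  have c3 : ((k + 1 : Nat) : Int) + 1 = ((k + 2 : Nat) : Int) := by push_cast; ring
  simp only [Function.comp, c1, c2, c3, PySem.List.pyGetD_natCast]
  unfold pvG
  rw [pvPad_mid L k hk]
  rw [pvPad_left L k hk]
  rw [pvPad_right L k hk]
  rw [List.getD_eq_getElem _ _ hk]

lemma pvZipForm_length (L : List (String × String)) : (pvZipForm L).length = L.length := by
  cases L with
  | nil => simp [pvZipForm]
  | cons a l => simp [pvZipForm]

lemma pv_A_eq (text : String) (train_flag : Bool) :
    generate_events2 text train_flag = (List.range (pvWordLi text train_flag).length).map (pvG (pvWordLi text train_flag)) := by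
  cases train_flag with
  | false =>
    have := pv_loop ((PySem.Str.split₀ text).map (fun w => (w, "x_pos")))
    simpa [generate_events2, pvWordLi, pvPad] using this
  | true =>
    have := pv_loop (((PySem.Str.split₀ text).filter (fun w => (pvSplitSlash w).length == 2)).map (fun w => pvPair2 (pvSplitSlash w)))
    simpa [generate_events2, pvWordLi, pvPad] using this

lemma pv_B_eq (text : String) (train_flag : Bool) :
    generate_events2_alt text train_flag = pvZipForm (pvWordLi text train_flag) := by
  cases train_flag with
  | false =>
    simp [generate_events2_alt, pvWordLi, pvZipForm, PySem.List.slice_to_neg_one,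
          PySem.List.slice_from_one, List.map_map, Function.comp_def, List.map_const']
  | true =>
    simp [generate_events2_alt, pvWordLi, pvZipForm, PySem.List.slice_to_neg_one,
          PySem.List.slice_from_one, List.filter_map, List.map_map, Function.comp_def, pvPair2]

lemma pv_main (L : List (String × String)) :
    (List.range L.length).map (pvG L) = pvZipForm L := by
  apply List.ext_getElem
  · simp [pvZipForm_length]
  · intro i h1 h2
    have hi : i < L.length := by simpa using h1
    unfold pvZipForm
    simp only [List.getElem_map, List.getElem_range, List.getElem_zip, pvG]
    rw [List.getD_eq_getElem _ _ hi]
    have h3 : ∀ (hb : i < ("pre1" :: (L.map Prod.fst).dropLast).length),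
        ("pre1" :: (L.map Prod.fst).dropLast)[i] =
          if i = 0 then "pre1" else (L.getD (i - 1) ("", "")).1 := by
      intro hb
      cases i with
      | zero => simp
      | succ j =>
        have hj : j < L.length := by omega
        rw [if_neg (by omega)]
        simp only [List.getElem_cons_succ, List.getElem_dropLast, List.getElem_map,
          Nat.add_sub_cancel]
        rw [List.getD_eq_getElem _ _ hj]
    have h4 : ∀ (hb : i < ((L.map Prod.fst).tail ++ ["pro1"]).length),
        ((L.map Prod.fst).tail ++ ["pro1"])[i] =
          if i + 1 < L.length then (L.getD (i + 1) ("", "")).1 else "pro1" := by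
      intro hb
      by_cases h : i + 1 < L.length
      · rw [if_pos h, List.getD_eq_getElem _ _ h]
        simp [List.getElem_append, List.getElem_tail, List.getElem_map]
        rw [dif_pos (by omega : i < L.length - 1)]
      · rw [if_neg h]
        simp [List.getElem_append]
        exact fun hf => absurd hf (by omega)
    rw [h3 (by simp; omega), h4 (by simp; omega)]

-- ===== VERDICT (by name: the statement is the Claim_ definition above) =====
theorem generate_events2_spec : Claim_equal_generate_events2 := by
  intro text train_flag _
  unfold Spec_generate_events2
  rw [pv_A_eq, pv_B_eq, pv_main]
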